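-- pv_equiv track=rewrite | github.com/iamhge/coding_test | Heap/pro_더_맵게.py | solution
-- ===== SOURCE A (Python) =====
-- import heapq
--
-- def solution(scoville, K):
--     heapq.heapify(scoville)
--     count = 0
--
--     while len(scoville) >= 2:
--         if scoville[0] >= K:
--             return count
--
--         a = heapq.heappop(scoville)
--         b = heapq.heappop(scoville)
--         mix = a + b*2
--         heapq.heappush(scoville, mix)
--         count += 1
--
--     if scoville[0] >= K:
--         return count
--
--     return -1
-- ===== SOURCE B (Python) =====
-- def solution(scoville, K):
--     s = sorted(scoville)
--     count = 0
--     while len(s) >= 2: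
--         if s[0] >= K:
--             return count
--         a = s.pop(0)
--         b = s.pop(0)
--         mix = a + 2 * b
--         lo = 0
--         while lo < len(s) and s[lo] <= mix:
--             lo += 1
--         s.insert(lo, mix)
--         count += 1
--     if s[0] >= K:
--         return count
--     return -1
-- ===== Notes on version B (the rewrite author's own statement) =====
-- stated objective: alternative
-- what changed: Replaces heapq's binary heap with a list sorted once up front and maintained by ordered (linear-scan) insertion of each mix, popping the two smallest from the front.
import Mathlib
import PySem

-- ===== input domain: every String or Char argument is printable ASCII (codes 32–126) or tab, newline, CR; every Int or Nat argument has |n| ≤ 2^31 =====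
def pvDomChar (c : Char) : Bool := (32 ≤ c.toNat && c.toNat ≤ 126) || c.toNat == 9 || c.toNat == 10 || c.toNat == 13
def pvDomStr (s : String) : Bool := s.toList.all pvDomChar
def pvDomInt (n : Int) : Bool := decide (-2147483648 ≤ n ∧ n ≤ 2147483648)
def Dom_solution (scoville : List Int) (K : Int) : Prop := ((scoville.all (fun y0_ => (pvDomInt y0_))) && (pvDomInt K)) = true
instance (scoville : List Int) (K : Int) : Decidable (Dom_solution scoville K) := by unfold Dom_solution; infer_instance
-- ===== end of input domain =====

-- B replaces A's binary heap by a once-sorted list maintained by ordered insertion (alternative data structure, same task).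
-- A mutates `scoville` in place (heapify/pop/push); B sorts a copy; the equivalence proved here is about the RETURN VALUE only.

-- ===== PORT A =====
-- A's priority queue comes from the `heapq` C library; it is ported as a verified min-heap
-- (skew heap) with the same push / pop-min interface semantics. `solution`'s return value
-- depends only on the multiset held by the queue, so this is exact for the return value.
-- The Nat argument of hmergeF / solLoopF is fuel only (always sufficient when called).
inductive IHeap where
  | leaf
  | node : Int → IHeap → IHeap → IHeap
deriving DecidableEq, Repr

def IHeap.sz : IHeap → Nat
  | .leaf => 0
  | .node _ l r => 1 + l.sz + r.sz

def hmergeF : Nat → IHeap → IHeap → IHeap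
  | 0, _, t2 => t2
  | _ + 1, .leaf, t2 => t2
  | _ + 1, .node a l1 r1, .leaf => .node a l1 r1
  | n + 1, .node a l1 r1, .node b l2 r2 =>
    if a ≤ b then .node a (hmergeF n r1 (.node b l2 r2)) l1
    else .node b (hmergeF n r2 (.node a l1 r1)) l2

def hmerge (t1 t2 : IHeap) : IHeap := hmergeF (t1.sz + t2.sz) t1 t2

-- heapq.heappush
def hpush (t : IHeap) (x : Int) : IHeap := hmerge t (.node x .leaf .leaf)

-- scoville[0] on the heap (default never reached under Pre_)
def htop (t : IHeap) : Int :=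
  match t with
  | .leaf => 0
  | .node a _ _ => a

-- heapq.heappop (leaf case unreachable in `solution`'s loop)
def hpop (t : IHeap) : Int × IHeap :=
  match t with
  | .leaf => (0, .leaf)
  | .node a l r => (a, hmerge l r)

-- heapq.heapify
def hheapify (l : List Int) : IHeap := l.foldl hpush .leaf

-- the while-loop of A (fuel = current heap size, enough for one pop of net size per round)
def solLoopF : Nat → IHeap → Int → Int → Int
  | 0, t, K, count => if htop t ≥ K then count else -1
  | fuel + 1, t, K, count =>
    if 2 ≤ t.sz then
      if htop t ≥ K then count
      else
        let p1 := hpop t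
        let p2 := hpop p1.2
        solLoopF fuel (hpush p2.2 (p1.1 + p2.1 * 2)) K (count + 1)
    else if htop t ≥ K then count else -1

def solution (scoville : List Int) (K : Int) : Int :=
  solLoopF (hheapify scoville).sz (hheapify scoville) K 0

-- ===== PORT B =====
-- the linear scan `while lo < len(s) and s[lo] <= mix` + s.insert(lo, mix), as one recursion
def insort : List Int → Int → List Int
  | [], x => [x]
  | y :: ys, x => if x < y then x :: y :: ys else y :: insort ys x

-- the while-loop of B over the sorted list (fuel = current length, always sufficient)
def altLoopF : Nat → List Int → Int → Int → Int
  | 0, s, K, count => if s.headD 0 ≥ K then count else -1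
  | fuel + 1, s, K, count =>
    if 2 ≤ s.length then
      if s.headD 0 ≥ K then count
      else
        let a := s.headD 0
        let b := s.tail.headD 0
        altLoopF fuel (insort s.tail.tail (a + 2 * b)) K (count + 1)
    else if s.headD 0 ≥ K then count else -1

def solution_alt (scoville : List Int) (K : Int) : Int :=
  altLoopF (PySem.List.sorted scoville (fun x => x) false).length
    (PySem.List.sorted scoville (fun x => x) false) K 0

-- ===== PRECONDITION & SPEC =====
-- Pre_ excludes only the empty list, on which A raises IndexError (scoville[0] after the loop; B raises there too).
def Pre_solution (scoville : List Int) (K : Int) : Prop := scoville ≠ []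
instance (scoville : List Int) (K : Int) : Decidable (Pre_solution scoville K) := by unfold Pre_solution; infer_instance
def pvWitness_solution : List Int × Int := ([1, 2, 3, 9, 10, 12], 7)

def Spec_solution (scoville : List Int) (K : Int) (out : Int) : Prop := out = solution_alt scoville K
instance (scoville : List Int) (K : Int) (out : Int) : Decidable (Spec_solution scoville K out) := by unfold Spec_solution; infer_instance

-- ===== CLAIM (what is proved, stated in full; the proofs are below) =====
def Claim_equal_solution : Prop := ∀ (scoville : List Int) (K : Int), Dom_solution scoville K → Pre_solution scoville K → Spec_solution scoville K (solution scoville K)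

-- ===== LEMMAS AND PROOFS =====

def IHeap.toL : IHeap → List Int
  | .leaf => []
  | .node a l r => a :: (l.toL ++ r.toL)

-- heap-order property
def HO : IHeap → Prop
  | .leaf => True
  | .node a l r => (∀ x ∈ l.toL, a ≤ x) ∧ (∀ x ∈ r.toL, a ≤ x) ∧ HO l ∧ HO r

theorem toL_length_sz (t : IHeap) : t.toL.length = t.sz := by
  induction t with
  | leaf => rfl
  | node a l r ihl ihr => simp [IHeap.toL, IHeap.sz, ihl, ihr]; omega

theorem toL_hmergeF_ms (n : Nat) : ∀ (t1 t2 : IHeap), t1.sz + t2.sz ≤ n →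
    ((hmergeF n t1 t2).toL : Multiset Int) = (t1.toL : Multiset Int) + (t2.toL : Multiset Int) := by
  induction n with
  | zero =>
      intro t1 t2 h
      have : t1 = .leaf := by cases t1 <;> simp_all [IHeap.sz]
      subst this
      simp [hmergeF, IHeap.toL]
  | succ n ih =>
      intro t1 t2 h
      cases t1 with
      | leaf => simp [hmergeF, IHeap.toL]
      | node a l1 r1 =>
        cases t2 with
        | leaf => simp [hmergeF, IHeap.toL]
        | node b l2 r2 =>
          simp only [IHeap.sz] at h
          by_cases hab : a ≤ b
          · have hf : r1.sz + (IHeap.node b l2 r2).sz ≤ n := by simp [IHeap.sz]; omega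
            simp only [hmergeF, if_pos hab, IHeap.toL]
            simp only [← Multiset.cons_coe, ← Multiset.coe_add]
            rw [ih _ _ hf]
            simp only [IHeap.toL, ← Multiset.cons_coe, ← Multiset.coe_add,
              ← Multiset.singleton_add]
            abel
          · have hf : r2.sz + (IHeap.node a l1 r1).sz ≤ n := by simp [IHeap.sz]; omega
            simp only [hmergeF, if_neg hab, IHeap.toL]
            simp only [← Multiset.cons_coe, ← Multiset.coe_add]
            rw [ih _ _ hf]
            simp only [IHeap.toL, ← Multiset.cons_coe, ← Multiset.coe_add,
              ← Multiset.singleton_add]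
            abel

theorem toL_hmerge (t1 t2 : IHeap) : (hmerge t1 t2).toL.Perm (t1.toL ++ t2.toL) := by
  rw [← Multiset.coe_eq_coe, ← Multiset.coe_add]
  exact toL_hmergeF_ms _ t1 t2 le_rfl

theorem HO_hmergeF (n : Nat) : ∀ (t1 t2 : IHeap), t1.sz + t2.sz ≤ n →
    HO t1 → HO t2 → HO (hmergeF n t1 t2) := by
  induction n with
  | zero => intro t1 t2 h h1 h2; simpa [hmergeF] using h2
  | succ n ih =>
      intro t1 t2 h h1 h2
      cases t1 with
      | leaf => simpa [hmergeF] using h2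
      | node a l1 r1 =>
        cases t2 with
        | leaf => simpa [hmergeF] using h1
        | node b l2 r2 =>
          simp only [IHeap.sz] at h
          obtain ⟨hl1, hr1, hol1, hor1⟩ := h1
          obtain ⟨hl2, hr2, hol2, hor2⟩ := h2
          by_cases hab : a ≤ b
          · have hf : r1.sz + (IHeap.node b l2 r2).sz ≤ n := by simp [IHeap.sz]; omega
            have hperm : (hmergeF n r1 (.node b l2 r2)).toL.Perm
                (r1.toL ++ (IHeap.node b l2 r2).toL) := by
              rw [← Multiset.coe_eq_coe, ← Multiset.coe_add]
              exact toL_hmergeF_ms n r1 _ hf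
            simp only [hmergeF, if_pos hab, HO]
            refine ⟨?_, hl1, ih _ _ hf hor1 ⟨hl2, hr2, hol2, hor2⟩, hol1⟩
            intro x hx
            rcases List.mem_append.mp (hperm.mem_iff.mp hx) with h' | h'
            · exact hr1 x h'
            · simp [IHeap.toL] at h'
              rcases h' with rfl | h' | h'
              · exact hab
              · exact le_trans hab (hl2 x h')
              · exact le_trans hab (hr2 x h')
          · have hba : b ≤ a := by omega
            have hf : r2.sz + (IHeap.node a l1 r1).sz ≤ n := by simp [IHeap.sz]; omega
            have hperm : (hmergeF n r2 (.node a l1 r1)).toL.Perm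
                (r2.toL ++ (IHeap.node a l1 r1).toL) := by
              rw [← Multiset.coe_eq_coe, ← Multiset.coe_add]
              exact toL_hmergeF_ms n r2 _ hf
            simp only [hmergeF, if_neg hab, HO]
            refine ⟨?_, hl2, ih _ _ hf hor2 ⟨hl1, hr1, hol1, hor1⟩, hol2⟩
            intro x hx
            rcases List.mem_append.mp (hperm.mem_iff.mp hx) with h' | h'
            · exact hr2 x h'
            · simp [IHeap.toL] at h'
              rcases h' with rfl | h' | h'
              · exact hba
              · exact le_trans hba (hl1 x h')
              · exact le_trans hba (hr1 x h')

theorem HO_hmerge (t1 t2 : IHeap) (h1 : HO t1) (h2 : HO t2) : HO (hmerge t1 t2) :=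
  HO_hmergeF _ t1 t2 le_rfl h1 h2

theorem htop_min (t : IHeap) (h : HO t) : ∀ x ∈ t.toL, htop t ≤ x := by
  cases t with
  | leaf => intro x hx; simp [IHeap.toL] at hx
  | node a l r =>
      obtain ⟨hl, hr, _, _⟩ := h
      intro x hx
      simp [IHeap.toL] at hx
      rcases hx with rfl | hx | hx
      · exact le_refl _
      · exact hl x hx
      · exact hr x hx

theorem insort_perm (l : List Int) (x : Int) : (insort l x).Perm (x :: l) := by
  induction l with
  | nil => rfl
  | cons y ys ih =>
      by_cases h : x < y
      · simp [insort, h]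
      · simp only [insort, if_neg h]
        exact (ih.cons y).trans (List.Perm.swap x y ys)

theorem insort_length (l : List Int) (x : Int) : (insort l x).length = l.length + 1 :=
  (insort_perm l x).length_eq

theorem insort_sorted (l : List Int) (x : Int) (h : l.Sorted (· ≤ ·)) :
    (insort l x).Sorted (· ≤ ·) := by
  induction l with
  | nil => simp [insort, List.sorted_singleton]
  | cons y ys ih =>
      rw [List.sorted_cons] at h
      obtain ⟨hy, hys⟩ := h
      by_cases hxy : x < y
      · simp only [insort, if_pos hxy, List.sorted_cons]
        refine ⟨?_, hy, hys⟩
        intro b hb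
        rcases List.mem_cons.mp hb with rfl | hb
        · exact le_of_lt hxy
        · exact le_trans (le_of_lt hxy) (hy b hb)
      · simp only [insort, if_neg hxy, List.sorted_cons]
        refine ⟨?_, ih hys⟩
        intro b hb
        rcases List.mem_cons.mp ((insort_perm ys x).mem_iff.mp hb) with rfl | hb'
        · omega
        · exact hy b hb'

theorem hpush_toL (t : IHeap) (x : Int) : (hpush t x).toL.Perm (x :: t.toL) := by
  refine (toL_hmerge t _).trans ?_
  simpa [IHeap.toL] using List.perm_append_comm

theorem HO_hpush (t : IHeap) (x : Int) (h : HO t) : HO (hpush t x) := by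
  exact HO_hmerge _ _ h (by simp [HO, IHeap.toL])

theorem hheapify_spec (l : List Int) :
    HO (hheapify l) ∧ (hheapify l).toL.Perm l := by
  suffices h : ∀ (acc : IHeap), HO acc →
      HO (l.foldl hpush acc) ∧ (l.foldl hpush acc).toL.Perm (acc.toL ++ l) by
    obtain ⟨h1, h2⟩ := h .leaf trivial
    exact ⟨h1, by simpa [hheapify, IHeap.toL] using h2⟩
  induction l with
  | nil => intro acc hacc; exact ⟨hacc, by simp⟩
  | cons x xs ih =>
      intro acc hacc
      obtain ⟨h1, h2⟩ := ih (hpush acc x) (HO_hpush acc x hacc)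
      refine ⟨h1, h2.trans ?_⟩
      refine ((hpush_toL acc x).append_right xs).trans ?_
      simpa using List.perm_middle.symm

theorem sorted_head_le (a : Int) (s : List Int) (h : (a :: s).Sorted (· ≤ ·)) :
    ∀ x ∈ a :: s, a ≤ x := by
  intro x hx
  rcases List.mem_cons.mp hx with rfl | hx
  · exact le_refl _
  · exact (List.sorted_cons.mp h).1 x hx

theorem htop_eq_head (t : IHeap) (a : Int) (s : List Int) (ho : HO t)
    (hp : t.toL.Perm (a :: s)) (hs : (a :: s).Sorted (· ≤ ·)) : htop t = a := by
  have htopmem : htop t ∈ t.toL := by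
    cases t with
    | leaf => simp [IHeap.toL] at hp
    | node b l r => simp [htop, IHeap.toL]
  have h1 : a ≤ htop t := sorted_head_le a s hs _ (hp.mem_iff.mp htopmem)
  have h2 : htop t ≤ a := htop_min t ho a (hp.mem_iff.mpr (by simp))
  omega

theorem sim (f : ℕ) : ∀ (s : List Int) (t : IHeap) (K c : Int), s.length ≤ f →
    HO t → t.toL.Perm s → s.Sorted (· ≤ ·) → solLoopF f t K c = altLoopF f s K c := by
  induction f with
  | zero =>
      intro s t K c hlen ho hp hs
      have hs0 : s = [] := by cases s <;> simp_all
      subst hs0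
      have ht : t = .leaf := by
        cases t with
        | leaf => rfl
        | node a l r => simp [IHeap.toL] at hp
      subst ht
      simp [solLoopF, altLoopF, htop]
  | succ f ih =>
    intro s t K c hlen ho hp hs
    have hlt : t.sz = s.length := by rw [← toL_length_sz]; exact hp.length_eq
    rcases s with _ | ⟨a, s1⟩
    · have ht : t = .leaf := by
        cases t with
        | leaf => rfl
        | node a l r => simp [IHeap.toL] at hp
      subst ht
      simp [solLoopF, altLoopF, IHeap.sz, htop]
    rcases s1 with _ | ⟨b, rest⟩
    · have hsz : t.sz = 1 := by simpa using hlt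
      have htop1 : htop t = a := htop_eq_head t a [] ho hp hs
      simp [solLoopF, altLoopF, hsz, htop1]
    · have hsz : 2 ≤ t.sz := by simp at hlt; omega
      have htopa : htop t = a := htop_eq_head t a (b :: rest) ho hp hs
      have hlen2 : 2 ≤ (a :: b :: rest).length := by simp
      simp only [solLoopF, altLoopF, if_pos hsz, if_pos hlen2, htopa,
        List.headD_cons, List.tail_cons]
      by_cases hK : a ≥ K
      · simp [hK]
      · simp only [if_neg hK]
        obtain ⟨a', l, r, ht⟩ : ∃ a' l r, t = .node a' l r := by
          cases t with
          | leaf => simp [IHeap.sz] at hsz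
          | node a' l r => exact ⟨a', l, r, rfl⟩
        subst ht
        have ha' : a' = a := by simpa [htop] using htopa
        subst a'
        obtain ⟨hl, hr, hol, hor⟩ := ho
        have ho1 : HO (hmerge l r) := HO_hmerge l r hol hor
        have hp1 : (hmerge l r).toL.Perm (b :: rest) := by
          have hcons : (a :: (hmerge l r).toL).Perm (a :: (b :: rest)) := by
            refine List.Perm.trans ?_ hp
            simpa [IHeap.toL] using (toL_hmerge l r).cons a
          exact hcons.cons_inv
        have hs1 : (b :: rest).Sorted (· ≤ ·) := (List.sorted_cons.mp hs).2
        have htopb : htop (hmerge l r) = b := htop_eq_head _ b rest ho1 hp1 hs1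
        obtain ⟨b', l2, r2, ht2⟩ : ∃ b' l2 r2, hmerge l r = .node b' l2 r2 := by
          cases h2 : hmerge l r with
          | leaf => rw [h2] at hp1; simp [IHeap.toL] at hp1
          | node b' l2 r2 => exact ⟨b', l2, r2, rfl⟩
        have hb' : b' = b := by rw [ht2] at htopb; simpa [htop] using htopb
        subst b'
        rw [ht2] at ho1 hp1
        obtain ⟨hl2, hr2, hol2, hor2⟩ := ho1
        have ho2 : HO (hmerge l2 r2) := HO_hmerge l2 r2 hol2 hor2
        have hp2 : (hmerge l2 r2).toL.Perm rest := by
          have hcons : (b :: (hmerge l2 r2).toL).Perm (b :: rest) := by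
            refine List.Perm.trans ?_ hp1
            simpa [IHeap.toL] using (toL_hmerge l2 r2).cons b
          exact hcons.cons_inv
        have hmixeq : a + b * 2 = a + 2 * b := by ring
        simp only [hpop, ht2, hmixeq]
        have hop : HO (hpush (hmerge l2 r2) (a + 2 * b)) := HO_hpush _ _ ho2
        have hpp : (hpush (hmerge l2 r2) (a + 2 * b)).toL.Perm (insort rest (a + 2 * b)) :=
          (hpush_toL _ _).trans ((hp2.cons _).trans (insort_perm rest (a + 2 * b)).symm)
        have hss : (insort rest (a + 2 * b)).Sorted (· ≤ ·) :=
          insort_sorted rest _ (List.sorted_cons.mp hs1).2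
        have hlen' : (insort rest (a + 2 * b)).length ≤ f := by
          rw [insort_length]; simp at hlen; omega
        exact ih _ _ K (c + 1) hlen' hop hpp hss

theorem sorted_sorted_le (l : List Int) :
    (PySem.List.sorted l (fun x => x) false).Sorted (· ≤ ·) := by
  have := PySem.List.sorted_pairwise (xs := l) (key := fun x => x)
  simpa [List.Sorted] using this

-- ===== VERDICT (by name: the statement is the Claim_ definition above) =====
theorem solution_spec : Claim_equal_solution := by
  intro scoville K _ hpre
  unfold Spec_solution solution solution_alt
  obtain ⟨ho, hp⟩ := hheapify_spec scoville
  have hperm : (hheapify scoville).toL.Perm (PySem.List.sorted scoville (fun x => x) false) :=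
    hp.trans (PySem.List.sorted_perm _ _ _).symm
  have hsz : (hheapify scoville).sz = (PySem.List.sorted scoville (fun x => x) false).length := by
    rw [← toL_length_sz]; exact hperm.length_eq
  rw [hsz]
  exact sim _ _ _ K 0 le_rfl ho hperm (sorted_sorted_le scoville)
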